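-- pv_equiv track=rewrite | github.com/jacobplace/aoc2023 | day3/day3.py | match_in_row_2
-- ===== SOURCE A (Python) =====
-- def match_in_row_2(nums: list, locs: list, row: int) -> dict:
--     sets_dict = dict()
--     for loc in locs:
--         if loc not in sets_dict:
--             sets_dict[loc] = set()
--         for i, num in enumerate(nums):
--             if loc in range(num[0], num[1]+1):
--                 sets_dict[loc].add((row, i))
--     return(sets_dict)
-- ===== SOURCE B (Python) =====
-- def _bisect_left(keys, x):
--     lo, hi = 0, len(keys)
--     while lo < hi:
--         mid = (lo + hi) // 2
--         if keys[mid] < x: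
--             lo = mid + 1
--         else:
--             hi = mid
--     return lo
--
--
-- def _bisect_right(keys, x):
--     lo, hi = 0, len(keys)
--     while lo < hi:
--         mid = (lo + hi) // 2
--         if x < keys[mid]:
--             hi = mid
--         else:
--             lo = mid + 1
--     return lo
--
--
-- def match_in_row_2(nums: list, locs: list, row: int) -> dict:
--     # one empty set per distinct loc, in first-occurrence order
--     sets_dict = {loc: set() for loc in locs}
--     # sorted key index: for each interval, binary-search the contained keys
--     keys = sorted(sets_dict)
--     for i, (start, end) in enumerate(nums):
--         for k in keys[_bisect_left(keys, start):_bisect_right(keys, end)]: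
--             sets_dict[k].add((row, i))
--     return sets_dict
-- ===== Notes on version B (the rewrite author's own statement) =====
-- stated objective: faster
-- what changed: A tests every (location, interval) pair with 'loc in range(...)'; B builds a sorted index of the distinct locations once and, for each interval, binary-searches (hand-written bisect) the contiguous block of contained locations, eliminating the per-pair containment test.
import Mathlib
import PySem

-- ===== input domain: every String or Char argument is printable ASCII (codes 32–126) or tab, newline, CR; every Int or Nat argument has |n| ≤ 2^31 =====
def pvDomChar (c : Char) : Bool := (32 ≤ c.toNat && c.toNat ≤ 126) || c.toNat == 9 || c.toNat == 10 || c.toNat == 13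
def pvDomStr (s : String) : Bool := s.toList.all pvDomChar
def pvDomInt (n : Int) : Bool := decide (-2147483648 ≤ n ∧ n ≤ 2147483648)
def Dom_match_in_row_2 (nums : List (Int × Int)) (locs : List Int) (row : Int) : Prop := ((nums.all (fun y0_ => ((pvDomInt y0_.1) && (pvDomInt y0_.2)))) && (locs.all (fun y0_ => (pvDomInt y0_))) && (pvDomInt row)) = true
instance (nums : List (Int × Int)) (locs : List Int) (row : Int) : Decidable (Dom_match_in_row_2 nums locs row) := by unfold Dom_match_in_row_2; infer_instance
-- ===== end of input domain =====

-- B replaces A's per-(location, interval) containment tests (O(L*N)) by a sorted index of the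
-- distinct locations built once: each interval binary-searches (hand-written bisect) the
-- contiguous block of contained locations — O((L+N) log U + output), measurably faster.

-- ===== PORT A =====
def match_in_row_2 (nums : List (Int × Int)) (locs : List Int) (row : Int) : List (Int × List (Int × Int)) :=
  (locs.foldl
    (fun d loc =>
      let d := if d.contains loc then d else d.insert loc PySem.Set.empty
      (PySem.List.enumerate nums 0).foldl
        (fun d p =>
          -- 'loc in range(num[0], num[1]+1)': step-1 range membership, written as its
          -- arithmetic characterization (exact: PySem.List.mem_pyRange_one), since Python
          -- evaluates 'in range' without materializing the range
          if p.2.1 ≤ loc ∧ loc < p.2.2 + 1 then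
            d.modify loc PySem.Set.empty (fun s => PySem.Set.add s (row, p.1))
          else d)
        d)
    PySem.Dict.empty).items

-- ===== PORT B =====
-- _bisect_left / _bisect_right in Source B are the classic CPython bisect loops, which is exactly
-- what PySem.List.bisectLeft / bisectRight compute (same lo/hi halving loop), so they are
-- ported as those primitives; keys[lo:hi] with 0 ≤ lo, hi ≤ len is PySem.List.slice.
def match_in_row_2_alt (nums : List (Int × Int)) (locs : List Int) (row : Int) : List (Int × List (Int × Int)) :=
  -- {loc: set() for loc in locs}: one empty set per distinct loc, first-occurrence order
  let d0 : PySem.Dict Int (PySem.Set (Int × Int)) :=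
    locs.foldl (fun d loc => d.insert loc PySem.Set.empty) PySem.Dict.empty
  -- keys = sorted(sets_dict)
  let keys := PySem.List.sorted d0.keys (fun x => x) false
  ((PySem.List.enumerate nums 0).foldl
    (fun d p =>
      (PySem.List.slice keys (some (PySem.List.bisectLeft keys p.2.1 : Nat))
          (some (PySem.List.bisectRight keys p.2.2 : Nat))).foldl
        (fun d' k => d'.modify k PySem.Set.empty (fun s => PySem.Set.add s (row, p.1)))
        d)
    d0).items

-- ===== PRECONDITION & SPEC =====
def Spec_match_in_row_2 (nums : List (Int × Int)) (locs : List Int) (row : Int) (out : List (Int × List (Int × Int))) : Prop := out = match_in_row_2_alt nums locs row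
instance (nums : List (Int × Int)) (locs : List Int) (row : Int) (out : List (Int × List (Int × Int))) : Decidable (Spec_match_in_row_2 nums locs row out) := by unfold Spec_match_in_row_2; infer_instance

-- ===== CLAIM (what is proved, stated in full; the proofs are below) =====
def Claim_equal_match_in_row_2 : Prop := ∀ (nums : List (Int × Int)) (locs : List Int) (row : Int), Dom_match_in_row_2 nums locs row → Spec_match_in_row_2 nums locs row (match_in_row_2 nums locs row)

-- ===== LEMMAS AND PROOFS =====

-- an element already present is not re-added
theorem pvSet_add_of_mem {α : Type} [BEq α] [LawfulBEq α] {x : α} {s : PySem.Set α} (h : x ∈ s) :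
    PySem.Set.add s x = s := by
  unfold PySem.Set.add
  rw [if_pos ((PySem.Set.contains_iff s x).mpr h)]

-- folding add over already-present elements is a no-op
theorem pvFold_add_of_subset {α : Type} [BEq α] [LawfulBEq α] (xs : List α) (s : PySem.Set α)
    (h : ∀ x ∈ xs, x ∈ s) : xs.foldl PySem.Set.add s = s := by
  induction xs with
  | nil => rfl
  | cons x xs ih =>
    rw [List.foldl_cons, pvSet_add_of_mem (h x (List.mem_cons_self))]
    exact ih fun y hy => h y (List.mem_cons_of_mem x hy)

-- a guarded add-fold is the add-fold over the filtered, mapped list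
theorem pvFold_if_add (c : Int × (Int × Int) → Prop) [DecidablePred c] (row : Int)
    (l : List (Int × (Int × Int))) (s : PySem.Set (Int × Int)) :
    l.foldl (fun s p => if c p then PySem.Set.add s (row, p.1) else s) s
      = (((l.filter (fun p => decide (c p))).map (fun p => (row, p.1))).foldl PySem.Set.add s) := by
  induction l generalizing s with
  | nil => rfl
  | cons p l ih =>
    by_cases hc : c p
    · simp [hc, ih]
    · simp [hc, ih]

-- dict contains agrees with key-list membership (Bool form)
theorem pvContains_eq (d : PySem.Dict Int (PySem.Set (Int × Int))) (loc : Int) :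
    d.contains loc = decide (loc ∈ d.keys) :=
  PySem.Dict.contains_eq_decide_mem_keys d loc

-- A's inner loop over enumerate: keys unchanged, value at loc folds, others untouched
theorem pvInnerA (c : Int → Int × (Int × Int) → Prop) [∀ a b, Decidable (c a b)] (row loc : Int) :
    ∀ (l : List (Int × (Int × Int))) (d : PySem.Dict Int (PySem.Set (Int × Int))),
    loc ∈ d.keys →
    (l.foldl (fun d p => if c loc p then d.modify loc PySem.Set.empty (fun s => PySem.Set.add s (row, p.1)) else d) d).keys = d.keys
    ∧ (l.foldl (fun d p => if c loc p then d.modify loc PySem.Set.empty (fun s => PySem.Set.add s (row, p.1)) else d) d).getD loc PySem.Set.empty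
        = l.foldl (fun s p => if c loc p then PySem.Set.add s (row, p.1) else s) (d.getD loc PySem.Set.empty)
    ∧ ∀ k, k ≠ loc →
      (l.foldl (fun d p => if c loc p then d.modify loc PySem.Set.empty (fun s => PySem.Set.add s (row, p.1)) else d) d).getD k PySem.Set.empty = d.getD k PySem.Set.empty := by
  intro l
  induction l with
  | nil => exact fun d _ => ⟨rfl, rfl, fun _ _ => rfl⟩
  | cons p l ih =>
    intro d hmem
    by_cases hc : c loc p
    · have hcon : d.contains loc = true := (PySem.Dict.contains_iff_mem_keys d loc).mpr hmem
      have hkeys : (d.modify loc PySem.Set.empty (fun s => PySem.Set.add s (row, p.1))).keys = d.keys := by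
        rw [PySem.Dict.keys_modify, PySem.Dict.keys_insert_of_contains _ _ hcon]
      obtain ⟨h1, h2, h3⟩ := ih (d.modify loc PySem.Set.empty (fun s => PySem.Set.add s (row, p.1))) (by rw [hkeys]; exact hmem)
      refine ⟨?_, ?_, ?_⟩
      · simp only [List.foldl_cons, if_pos hc]
        exact h1.trans hkeys
      · simp only [List.foldl_cons, if_pos hc]
        rw [h2, PySem.Dict.getD_modify]
        simp
      · intro k hk
        simp only [List.foldl_cons, if_pos hc]
        rw [h3 k hk, PySem.Dict.getD_modify]
        simp [hk]
    · obtain ⟨h1, h2, h3⟩ := ih d hmem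
      refine ⟨?_, ?_, ?_⟩
      · simpa only [List.foldl_cons, if_neg hc] using h1
      · simp only [List.foldl_cons, if_neg hc]
        exact h2
      · intro k hk
        simpa only [List.foldl_cons, if_neg hc] using h3 k hk

-- the elements tagged for key k, in index order
def pvXs (c : Int → Int × (Int × Int) → Prop) [∀ a b, Decidable (c a b)]
    (nums : List (Int × Int)) (row k : Int) : List (Int × Int) :=
  (((PySem.List.enumerate nums 0).filter (fun p => decide (c k p))).map (fun p => (row, p.1)))

-- A's outer loop invariant
theorem pvOuterA (c : Int → Int × (Int × Int) → Prop) [∀ a b, Decidable (c a b)]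
    (nums : List (Int × Int)) (row : Int) :
    ∀ (locs : List Int) (d : PySem.Dict Int (PySem.Set (Int × Int))),
    d.keys.Nodup →
    (∀ k ∈ d.keys, d.getD k PySem.Set.empty = PySem.Set.ofList (pvXs c nums row k)) →
    (locs.foldl
      (fun d loc =>
        let d := if d.contains loc then d else d.insert loc PySem.Set.empty
        (PySem.List.enumerate nums 0).foldl
          (fun d p => if c loc p then d.modify loc PySem.Set.empty (fun s => PySem.Set.add s (row, p.1)) else d) d)
      d).keys = PySem.Set.update d.keys locs
    ∧ (locs.foldl
      (fun d loc =>
        let d := if d.contains loc then d else d.insert loc PySem.Set.empty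
        (PySem.List.enumerate nums 0).foldl
          (fun d p => if c loc p then d.modify loc PySem.Set.empty (fun s => PySem.Set.add s (row, p.1)) else d) d)
      d).keys.Nodup
    ∧ ∀ k ∈ (locs.foldl
      (fun d loc =>
        let d := if d.contains loc then d else d.insert loc PySem.Set.empty
        (PySem.List.enumerate nums 0).foldl
          (fun d p => if c loc p then d.modify loc PySem.Set.empty (fun s => PySem.Set.add s (row, p.1)) else d) d)
      d).keys,
      (locs.foldl
      (fun d loc =>
        let d := if d.contains loc then d else d.insert loc PySem.Set.empty
        (PySem.List.enumerate nums 0).foldl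
          (fun d p => if c loc p then d.modify loc PySem.Set.empty (fun s => PySem.Set.add s (row, p.1)) else d) d)
      d).getD k PySem.Set.empty = PySem.Set.ofList (pvXs c nums row k) := by
  intro locs
  induction locs with
  | nil => exact fun d hnd hval => ⟨rfl, hnd, hval⟩
  | cons loc locs ih =>
    intro d hnd hval
    by_cases hc : loc ∈ d.keys
    · have hcon : d.contains loc = true := (PySem.Dict.contains_iff_mem_keys d loc).mpr hc
      have hd : (if d.contains loc then d else d.insert loc PySem.Set.empty) = d := by
        simp [hcon]
      have hadd : PySem.Set.add d.keys loc = d.keys := pvSet_add_of_mem hc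
      obtain ⟨i1, i2, i3⟩ := pvInnerA c row loc (PySem.List.enumerate nums 0) d hc
      obtain ⟨o1, o2, o3⟩ := ih
        ((PySem.List.enumerate nums 0).foldl
          (fun d p => if c loc p then d.modify loc PySem.Set.empty (fun s => PySem.Set.add s (row, p.1)) else d) d)
        (by rw [i1]; exact hnd)
        (by
          intro k hk
          rw [i1] at hk
          by_cases hkl : k = loc
          · subst hkl
            rw [i2, hval k hc, pvFold_if_add (c k) row]
            apply pvFold_add_of_subset
            intro x hx
            rw [PySem.Set.mem_ofList]
            exact hx
          · rw [i3 k hkl]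
            exact hval k hk)
      refine ⟨?_, ?_, ?_⟩
      · simp only [List.foldl_cons, hd]
        rw [o1, i1]
        simp only [PySem.Set.update, List.foldl_cons, hadd]
      · simp only [List.foldl_cons, hd]
        exact o2
      · simp only [List.foldl_cons, hd]
        exact o3
    · have hcon : d.contains loc = false := by
        rw [pvContains_eq]
        simp [hc]
      have hd : (if d.contains loc then d else d.insert loc PySem.Set.empty)
          = d.insert loc PySem.Set.empty := by
        simp [hcon]
      have hkI : (d.insert loc PySem.Set.empty).keys = d.keys ++ [loc] :=
        PySem.Dict.keys_insert_of_not_contains d _ hcon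
      have hadd : PySem.Set.add d.keys loc = d.keys ++ [loc] := by
        unfold PySem.Set.add
        rw [if_neg (fun h => hc ((PySem.Set.contains_iff _ _).mp h))]
      have hmemI : loc ∈ (d.insert loc PySem.Set.empty).keys := by
        rw [hkI]; exact List.mem_append_right _ (List.mem_singleton.mpr rfl)
      obtain ⟨i1, i2, i3⟩ := pvInnerA c row loc (PySem.List.enumerate nums 0)
        (d.insert loc PySem.Set.empty) hmemI
      obtain ⟨o1, o2, o3⟩ := ih
        ((PySem.List.enumerate nums 0).foldl
          (fun d p => if c loc p then d.modify loc PySem.Set.empty (fun s => PySem.Set.add s (row, p.1)) else d)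
          (d.insert loc PySem.Set.empty))
        (by rw [i1, hkI, ← hadd]; exact PySem.Set.nodup_add d.keys loc hnd)
        (by
          intro k hk
          rw [i1, hkI] at hk
          by_cases hkl : k = loc
          · subst hkl
            rw [i2, PySem.Dict.getD_insert, if_pos rfl, pvFold_if_add (c k) row]
            rfl
          · rw [i3 k hkl, PySem.Dict.getD_insert, if_neg hkl]
            rcases List.mem_append.mp hk with hk' | hk'
            · exact hval k hk'
            · exact absurd (List.mem_singleton.mp hk') hkl)
      refine ⟨?_, ?_, ?_⟩
      · simp only [List.foldl_cons, hd]
        rw [o1, i1, hkI]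
        simp only [PySem.Set.update, List.foldl_cons, hadd]
      · simp only [List.foldl_cons, hd]
        exact o2
      · simp only [List.foldl_cons, hd]
        exact o3

-- B's dict comprehension: keys are the distinct locs in first-occurrence order, values empty
theorem pvPhase1 :
    ∀ (locs : List Int) (d : PySem.Dict Int (PySem.Set (Int × Int))),
    (∀ k, d.getD k PySem.Set.empty = PySem.Set.empty) →
    (locs.foldl (fun d loc => d.insert loc PySem.Set.empty) d).keys = PySem.Set.update d.keys locs
    ∧ ∀ k, (locs.foldl (fun d loc => d.insert loc PySem.Set.empty) d).getD k PySem.Set.empty = PySem.Set.empty := by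
  intro locs
  induction locs with
  | nil => exact fun d hval => ⟨rfl, hval⟩
  | cons loc locs ih =>
    intro d hval
    have hval' : ∀ k, (d.insert loc PySem.Set.empty).getD k PySem.Set.empty = PySem.Set.empty := by
      intro k
      rw [PySem.Dict.getD_insert]
      by_cases hkl : k = loc
      · simp [hkl]
      · simp only [if_neg hkl]
        exact hval k
    obtain ⟨o1, o2⟩ := ih (d.insert loc PySem.Set.empty) hval'
    refine ⟨?_, by simpa only [List.foldl_cons] using o2⟩
    simp only [List.foldl_cons]
    rw [o1]
    by_cases hc : loc ∈ d.keys
    · rw [PySem.Dict.keys_insert_of_contains d _ ((PySem.Dict.contains_iff_mem_keys d loc).mpr hc)]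
      simp only [PySem.Set.update, List.foldl_cons, pvSet_add_of_mem hc]
    · rw [PySem.Dict.keys_insert_of_not_contains d _ (by rw [pvContains_eq]; simp [hc])]
      have hadd : PySem.Set.add d.keys loc = d.keys ++ [loc] := by
        unfold PySem.Set.add
        rw [if_neg (fun h => hc ((PySem.Set.contains_iff _ _).mp h))]
      simp only [PySem.Set.update, List.foldl_cons, hadd]

-- an index-window take/drop equals a filter when the predicate holds exactly on the window
theorem pvSegEqFilter (p : Int → Bool) :
    ∀ (xs : List Int) (lo hi : Nat),
    (∀ j (h : j < xs.length), (p xs[j] = true ↔ lo ≤ j ∧ j < hi)) →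
    (xs.drop lo).take (hi - lo) = xs.filter p := by
  intro xs
  induction xs with
  | nil => intro lo hi _; simp
  | cons x xs ih =>
    intro lo hi h
    cases lo with
    | zero =>
      cases hi with
      | zero =>
        have hall : ∀ a ∈ x :: xs, ¬ p a = true := by
          intro a ha hp
          obtain ⟨j, hj, rfl⟩ := List.mem_iff_getElem.mp ha
          have := (h j hj).mp hp
          omega
        simp [List.filter_eq_nil_iff.mpr hall]
      | succ h' =>
        have hx : p x = true := (h 0 (by simp)).mpr (by omega)
        have ih' := ih 0 h' (by
          intro j hj
          have hh := h (j + 1) (by simpa using Nat.succ_lt_succ hj)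
          simp only [List.getElem_cons_succ] at hh
          rw [hh]
          omega)
        simp only [List.drop_zero, Nat.sub_zero] at ih' ⊢
        rw [List.take_succ_cons, List.filter_cons_of_pos hx, ih']
    | succ l' =>
      have hx : ¬ p x = true := fun hp => by
        have := (h 0 (by simp)).mp hp
        omega
      have ih' := ih l' (hi - 1) (by
        intro j hj
        have hh := h (j + 1) (by simpa using Nat.succ_lt_succ hj)
        simp only [List.getElem_cons_succ] at hh
        rw [hh]
        omega)
      rw [List.drop_succ_cons, List.filter_cons_of_neg (by simpa using hx),
        show hi - (l' + 1) = (hi - 1) - l' by omega]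
      exact ih'

-- on a sorted list, the bisect window is exactly the contained elements
theorem pvSliceFilter (sk : List Int) (hpair : sk.Pairwise (· ≤ ·)) (s e : Int) :
    PySem.List.slice sk (some (PySem.List.bisectLeft sk s : Nat)) (some (PySem.List.bisectRight sk e : Nat))
      = sk.filter (fun k => decide (s ≤ k ∧ k ≤ e)) := by
  rw [PySem.List.slice_natCast]
  apply pvSegEqFilter
  intro j hj
  obtain ⟨hl1, hl2, hl3⟩ := PySem.List.bisectLeft_spec sk s hpair
  obtain ⟨hr1, hr2, hr3⟩ := PySem.List.bisectRight_spec sk e hpair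
  simp only [decide_eq_true_eq]
  constructor
  · rintro ⟨h1, h2⟩
    constructor
    · by_contra hlt
      exact absurd h1 (not_le.mpr (hl2 j hj (by omega)))
    · by_contra hge
      exact absurd h2 (not_le.mpr (hr3 j hj (by omega)))
  · rintro ⟨h1, h2⟩
    exact ⟨hl3 j hj h1, hr2 j hj h2⟩

-- B's inner loop: every key of the segment gets the pair added, keys unchanged
theorem pvInnerB (row : Int) (p : Int × (Int × Int)) :
    ∀ (K : List Int) (d : PySem.Dict Int (PySem.Set (Int × Int))),
    K.Nodup → (∀ k ∈ K, k ∈ d.keys) →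
    (K.foldl (fun d' k => d'.modify k PySem.Set.empty (fun s => PySem.Set.add s (row, p.1))) d).keys = d.keys
    ∧ ∀ k, (K.foldl (fun d' k => d'.modify k PySem.Set.empty (fun s => PySem.Set.add s (row, p.1))) d).getD k PySem.Set.empty
        = if k ∈ K then PySem.Set.add (d.getD k PySem.Set.empty) (row, p.1) else d.getD k PySem.Set.empty := by
  intro K
  induction K with
  | nil => exact fun d _ _ => ⟨rfl, fun k => by simp⟩
  | cons loc K ih =>
    intro d hnd hsub
    have hloc : loc ∈ d.keys := hsub loc List.mem_cons_self
    have hcon : d.contains loc = true := (PySem.Dict.contains_iff_mem_keys d loc).mpr hloc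
    obtain ⟨hlK, hK⟩ := List.nodup_cons.mp hnd
    have hkeys : (d.modify loc PySem.Set.empty (fun s => PySem.Set.add s (row, p.1))).keys = d.keys := by
      rw [PySem.Dict.keys_modify, PySem.Dict.keys_insert_of_contains _ _ hcon]
    obtain ⟨o1, o2⟩ := ih (d.modify loc PySem.Set.empty (fun s => PySem.Set.add s (row, p.1))) hK
      (by intro k hk; rw [hkeys]; exact hsub k (List.mem_cons_of_mem loc hk))
    refine ⟨?_, ?_⟩
    · simp only [List.foldl_cons]
      exact o1.trans hkeys
    · intro k
      simp only [List.foldl_cons]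
      rw [o2 k, PySem.Dict.getD_modify]
      by_cases hkl : k = loc
      · subst hkl
        simp [hlK]
      · by_cases hkK : k ∈ K
        · simp [hkK, hkl]
        · simp [hkK, hkl]

-- B's pass over the numbers: per key, the guarded add-fold
theorem pvOuterB (c : Int → Int × (Int × Int) → Prop) [∀ a b, Decidable (c a b)] (row : Int)
    (seg : Int × (Int × Int) → List Int) (K0 : List Int)
    (hseg : ∀ p, (seg p).Nodup ∧ ∀ k, (k ∈ seg p ↔ k ∈ K0 ∧ c k p)) :
    ∀ (l : List (Int × (Int × Int))) (d : PySem.Dict Int (PySem.Set (Int × Int))),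
    d.keys = K0 →
    (l.foldl (fun d p => (seg p).foldl (fun d' k => d'.modify k PySem.Set.empty (fun s => PySem.Set.add s (row, p.1))) d) d).keys = K0
    ∧ ∀ k ∈ K0,
      (l.foldl (fun d p => (seg p).foldl (fun d' k => d'.modify k PySem.Set.empty (fun s => PySem.Set.add s (row, p.1))) d) d).getD k PySem.Set.empty
        = l.foldl (fun s p => if c k p then PySem.Set.add s (row, p.1) else s) (d.getD k PySem.Set.empty) := by
  intro l
  induction l with
  | nil => exact fun d hk => ⟨hk, fun k _ => rfl⟩
  | cons p l ih =>
    intro d hk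
    obtain ⟨hsnd, hsmem⟩ := hseg p
    obtain ⟨i1, i2⟩ := pvInnerB row p (seg p) d hsnd
      (fun k hk' => by rw [hk]; exact ((hsmem k).mp hk').1)
    obtain ⟨o1, o2⟩ := ih _ (i1.trans hk)
    refine ⟨by simpa only [List.foldl_cons] using o1, ?_⟩
    intro k hkK
    simp only [List.foldl_cons]
    rw [o2 k hkK, i2 k]
    by_cases hc : c k p
    · rw [if_pos ((hsmem k).mpr ⟨hkK, hc⟩), if_pos hc]
    · rw [if_neg (fun h => hc ((hsmem k).mp h).2), if_neg hc]

-- ===== VERDICT (by name: the statement is the Claim_ definition above) =====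
theorem match_in_row_2_spec : Claim_equal_match_in_row_2 := by
  intro nums locs row _
  unfold Spec_match_in_row_2
  obtain ⟨a1, a2, a3⟩ := pvOuterA (fun loc p => p.2.1 ≤ loc ∧ loc < p.2.2 + 1)
    nums row locs PySem.Dict.empty PySem.Dict.nodup_keys_empty (by simp [PySem.Dict.keys_empty])
  obtain ⟨p1, p2⟩ := pvPhase1 locs PySem.Dict.empty (fun k => PySem.Dict.getD_empty k _)
  have hnd0 : (locs.foldl (fun d loc => d.insert loc PySem.Set.empty)
      (PySem.Dict.empty : PySem.Dict Int (PySem.Set (Int × Int)))).keys.Nodup := by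
    rw [p1]
    exact PySem.Set.nodup_update _ _ (by simp [PySem.Dict.keys_empty])
  have hperm : (PySem.List.sorted (locs.foldl (fun d loc => d.insert loc PySem.Set.empty)
        (PySem.Dict.empty : PySem.Dict Int (PySem.Set (Int × Int)))).keys (fun x => x) false).Perm
      (locs.foldl (fun d loc => d.insert loc PySem.Set.empty)
        (PySem.Dict.empty : PySem.Dict Int (PySem.Set (Int × Int)))).keys :=
    PySem.List.sorted_perm _ _ _
  have hpair := PySem.List.sorted_pairwise
    (locs.foldl (fun d loc => d.insert loc PySem.Set.empty)
      (PySem.Dict.empty : PySem.Dict Int (PySem.Set (Int × Int)))).keys (fun x => x)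
  have hndsk := hperm.nodup_iff.mpr hnd0
  have hseg : ∀ p : Int × (Int × Int),
      (PySem.List.slice (PySem.List.sorted (locs.foldl (fun d loc => d.insert loc PySem.Set.empty)
          (PySem.Dict.empty : PySem.Dict Int (PySem.Set (Int × Int)))).keys (fun x => x) false)
        (some (PySem.List.bisectLeft (PySem.List.sorted (locs.foldl (fun d loc => d.insert loc PySem.Set.empty)
          (PySem.Dict.empty : PySem.Dict Int (PySem.Set (Int × Int)))).keys (fun x => x) false) p.2.1 : Nat))
        (some (PySem.List.bisectRight (PySem.List.sorted (locs.foldl (fun d loc => d.insert loc PySem.Set.empty)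
          (PySem.Dict.empty : PySem.Dict Int (PySem.Set (Int × Int)))).keys (fun x => x) false) p.2.2 : Nat))).Nodup
      ∧ ∀ k, (k ∈ PySem.List.slice (PySem.List.sorted (locs.foldl (fun d loc => d.insert loc PySem.Set.empty)
          (PySem.Dict.empty : PySem.Dict Int (PySem.Set (Int × Int)))).keys (fun x => x) false)
        (some (PySem.List.bisectLeft (PySem.List.sorted (locs.foldl (fun d loc => d.insert loc PySem.Set.empty)
          (PySem.Dict.empty : PySem.Dict Int (PySem.Set (Int × Int)))).keys (fun x => x) false) p.2.1 : Nat))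
        (some (PySem.List.bisectRight (PySem.List.sorted (locs.foldl (fun d loc => d.insert loc PySem.Set.empty)
          (PySem.Dict.empty : PySem.Dict Int (PySem.Set (Int × Int)))).keys (fun x => x) false) p.2.2 : Nat))
        ↔ k ∈ (locs.foldl (fun d loc => d.insert loc PySem.Set.empty)
          (PySem.Dict.empty : PySem.Dict Int (PySem.Set (Int × Int)))).keys ∧ (p.2.1 ≤ k ∧ k ≤ p.2.2)) := by
    intro p
    rw [pvSliceFilter _ hpair p.2.1 p.2.2]
    refine ⟨hndsk.filter _, ?_⟩
    intro k
    rw [List.mem_filter]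
    simp [PySem.List.mem_sorted]
  obtain ⟨b1, b2⟩ := pvOuterB (fun k p => p.2.1 ≤ k ∧ k ≤ p.2.2) row _ _ hseg
    (PySem.List.enumerate nums 0)
    (locs.foldl (fun d loc => d.insert loc PySem.Set.empty) PySem.Dict.empty) rfl
  show match_in_row_2 nums locs row = match_in_row_2_alt nums locs row
  unfold match_in_row_2 match_in_row_2_alt
  rw [PySem.Dict.items_eq_map_keys _ a2 PySem.Set.empty,
    PySem.Dict.items_eq_map_keys _ (by rw [b1]; exact hnd0) PySem.Set.empty]
  have hxs : ∀ k, pvXs (fun loc p => p.2.1 ≤ loc ∧ loc < p.2.2 + 1) nums row k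
      = pvXs (fun loc p => p.2.1 ≤ loc ∧ loc ≤ p.2.2) nums row k := by
    intro k
    unfold pvXs
    congr 1
    apply List.filter_congr
    intro p _
    simp only [decide_eq_decide]
    omega
  have hkeys : (locs.foldl
      (fun d loc =>
        let d := if d.contains loc then d else d.insert loc PySem.Set.empty
        (PySem.List.enumerate nums 0).foldl
          (fun d p =>
            if p.2.1 ≤ loc ∧ loc < p.2.2 + 1 then
              d.modify loc PySem.Set.empty (fun s => PySem.Set.add s (row, p.1))
            else d)
          d)
      PySem.Dict.empty).keys
      = ((PySem.List.enumerate nums 0).foldl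
        (fun d p =>
          (PySem.List.slice (PySem.List.sorted (locs.foldl (fun d loc => d.insert loc PySem.Set.empty)
              (PySem.Dict.empty : PySem.Dict Int (PySem.Set (Int × Int)))).keys (fun x => x) false)
            (some (PySem.List.bisectLeft (PySem.List.sorted (locs.foldl (fun d loc => d.insert loc PySem.Set.empty)
              (PySem.Dict.empty : PySem.Dict Int (PySem.Set (Int × Int)))).keys (fun x => x) false) p.2.1 : Nat))
            (some (PySem.List.bisectRight (PySem.List.sorted (locs.foldl (fun d loc => d.insert loc PySem.Set.empty)
              (PySem.Dict.empty : PySem.Dict Int (PySem.Set (Int × Int)))).keys (fun x => x) false) p.2.2 : Nat))).foldl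
            (fun d' k => d'.modify k PySem.Set.empty (fun s => PySem.Set.add s (row, p.1)))
            d)
        (locs.foldl (fun d loc => d.insert loc PySem.Set.empty) PySem.Dict.empty)).keys := by
    rw [a1, b1, p1]
  rw [hkeys]
  apply List.map_congr_left
  intro k hk
  have hk0 : k ∈ (locs.foldl (fun d loc => d.insert loc PySem.Set.empty)
      (PySem.Dict.empty : PySem.Dict Int (PySem.Set (Int × Int)))).keys := by
    rw [← b1]; exact hk
  have hkA : k ∈ (locs.foldl
      (fun d loc =>
        let d := if d.contains loc then d else d.insert loc PySem.Set.empty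
        (PySem.List.enumerate nums 0).foldl
          (fun d p =>
            if p.2.1 ≤ loc ∧ loc < p.2.2 + 1 then
              d.modify loc PySem.Set.empty (fun s => PySem.Set.add s (row, p.1))
            else d)
          d)
      PySem.Dict.empty).keys := by
    rw [hkeys]
    exact hk
  rw [a3 k hkA, b2 k hk0, p2 k, pvFold_if_add (fun p => p.2.1 ≤ k ∧ k ≤ p.2.2) row, hxs k]
  rfl
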